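-- pv_equiv track=rewrite | github.com/Lovelyjha/GeeksforGeeks | 2.Easy/Sum_of_length_Array.py | sumofLength
-- ===== SOURCE A (Python) =====
-- def sumofLength(arr,n):
--     s=[]
--     j=0
--     ans=0
--     for i in range(n):
--         while(j<n and (arr[j] not in s)):
--             s.append(arr[j])
--             j+=1
--         ans+=((j-i)*(j-i+1))//2
--         s.remove(arr[i])
--     return ans
-- ===== SOURCE B (Python) =====
-- def sumofLength(arr, n):
--     # Backward pass: for each start i, the distinct window's right bound is
--     # min(bound of i+1, next occurrence of arr[i]); dict gives O(1) lookups.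
--     nxt = {}
--     bound = n
--     ans = 0
--     for i in range(n - 1, -1, -1):
--         v = arr[i]
--         k = nxt.get(v)
--         if k is not None and k < bound:
--             bound = k
--         L = bound - i
--         ans += L * (L + 1) // 2
--         nxt[v] = i
--     return ans
-- ===== Notes on version B (the rewrite author's own statement) =====
-- stated objective: faster
-- what changed: Replaced A's forward sliding window that maintains a Python-list window with linear membership tests and list removals by a single backward pass that computes each start's distinct-window bound from the next-occurrence dictionary (bound_i = min(bound_{i+1}, next occurrence of arr[i])), with no inner loop.
import Mathlib
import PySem

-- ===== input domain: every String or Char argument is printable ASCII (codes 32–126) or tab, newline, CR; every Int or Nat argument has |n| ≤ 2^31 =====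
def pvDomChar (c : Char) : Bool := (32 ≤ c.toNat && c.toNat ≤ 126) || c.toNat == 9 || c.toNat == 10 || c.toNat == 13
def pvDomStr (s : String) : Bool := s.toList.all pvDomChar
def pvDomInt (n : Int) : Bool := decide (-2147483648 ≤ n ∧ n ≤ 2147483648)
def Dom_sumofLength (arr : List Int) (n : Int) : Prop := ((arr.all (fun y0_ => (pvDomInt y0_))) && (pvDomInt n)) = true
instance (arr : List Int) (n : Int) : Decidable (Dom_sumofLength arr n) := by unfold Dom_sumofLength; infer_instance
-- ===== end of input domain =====

-- B replaces A's forward sliding window (Python-list membership/removal) by one backward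
-- pass using a next-occurrence dictionary; objective: faster (asymptotic, O(n^2) -> O(n)).

-- ===== PORT A =====
-- inner 'while(j<n and (arr[j] not in s)): s.append(arr[j]); j+=1'
-- (arr[j] is in range whenever Pre_ holds; the .getD 0 default is never used there)
def pvGrowA (arr : List Int) (n : Int) (s : List Int) (j : Int) : List Int × Int :=
  if h : j < n ∧ ((PySem.List.pyGet? arr j).getD 0) ∉ s then
    pvGrowA arr n (s ++ [(PySem.List.pyGet? arr j).getD 0]) (j + 1)
  else (s, j)
termination_by (n - j).toNat
decreasing_by omega

def sumofLength (arr : List Int) (n : Int) : Int :=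
  (((PySem.List.pyRange 0 n 1).foldl (fun (st : List Int × Int × Int) i =>
      let g := pvGrowA arr n st.1 st.2.1
      let ans := st.2.2 + PySem.Int.floordiv ((g.2 - i) * (g.2 - i + 1)) 2
      -- s.remove(arr[i]): never a ValueError under Pre_, so the .getD default is unused
      (((PySem.List.remove? g.1 ((PySem.List.pyGet? arr i).getD 0)).getD g.1), g.2, ans))
    ([], 0, 0))).2.2

-- ===== PORT B =====
def sumofLength_alt (arr : List Int) (n : Int) : Int :=
  (((PySem.List.pyRange (n - 1) (-1) (-1)).foldl
      (fun (st : PySem.Dict Int Int × Int × Int) i =>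
        let v := (PySem.List.pyGet? arr i).getD 0          -- arr[i], in range under Pre_
        let bound := match st.1.get? v with
          | some k => if k < st.2.1 then k else st.2.1
          | none => st.2.1
        (st.1.insert v i, bound,
          st.2.2 + PySem.Int.floordiv ((bound - i) * (bound - i + 1)) 2))
      (PySem.Dict.empty, n, 0))).2.2

-- ===== PRECONDITION & SPEC =====
-- A raises IndexError (and so does B) exactly when n > len(arr); nothing else is excluded.
def Pre_sumofLength (arr : List Int) (n : Int) : Prop := n ≤ (arr.length : Int)
instance (arr : List Int) (n : Int) : Decidable (Pre_sumofLength arr n) := by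
  unfold Pre_sumofLength; infer_instance
def pvWitness_sumofLength : List Int × Int := ([1, 2, 1], 3)

def Spec_sumofLength (arr : List Int) (n : Int) (out : Int) : Prop := out = sumofLength_alt arr n
instance (arr : List Int) (n : Int) (out : Int) : Decidable (Spec_sumofLength arr n out) := by
  unfold Spec_sumofLength; infer_instance

-- ===== CLAIM (what is proved, stated in full; the proofs are below) =====
def Claim_equal_sumofLength : Prop := ∀ (arr : List Int) (n : Int),
  Dom_sumofLength arr n → Pre_sumofLength arr n → Spec_sumofLength arr n (sumofLength arr n)

-- ===== LEMMAS AND PROOFS =====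

-- length of the longest prefix of xs whose elements are pairwise distinct and avoid 'seen'
def pvDpl (seen : List Int) : List Int → Nat
  | [] => 0
  | x :: xs => if x ∈ seen then 0 else pvDpl (x :: seen) xs + 1

def pvT (m : Nat) : Nat := m * (m + 1) / 2

-- the common value of both programs on the first-n prefix l: sum over suffixes
def pvSpecSum : List Int → Nat
  | [] => 0
  | x :: xs => pvT (pvDpl [] (x :: xs)) + pvSpecSum xs

-- first index ≥ i at which v occurs in l (as the dict of B stores it)
def pvNxt (l : List Int) (i : Nat) (v : Int) : Option Int :=
  if v ∈ l.drop i then some ((i + (l.drop i).findIdx (· == v) : Nat) : Int) else none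

theorem pvNxt_step (l : List Int) (i : Nat) (hll : i < l.length) (w : Int) :
    pvNxt l i w = if w = l[i]'hll then some ((i : Nat) : Int) else pvNxt l (i + 1) w := by
  have hpos : l.drop i = l[i]'hll :: l.drop (i + 1) := List.drop_eq_getElem_cons hll
  by_cases hw : w = l[i]'hll
  · rw [if_pos hw, pvNxt, if_pos (by rw [hpos, ← hw]; exact List.mem_cons_self)]
    rw [hpos, List.findIdx_cons, show ((l[i]'hll) == w) = true by simp [hw], cond_true,
      Nat.add_zero]
  · rw [if_neg hw, pvNxt, pvNxt, hpos]
    by_cases hwm : w ∈ l.drop (i + 1)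
    · rw [if_pos (List.mem_cons_of_mem _ hwm), if_pos hwm]
      rw [List.findIdx_cons, show ((l[i]'hll) == w) = false by
        rw [beq_eq_false_iff_ne]; exact fun hc => hw hc.symm, cond_false]
      congr 1
      omega
    · rw [if_neg (by
        rw [List.mem_cons]
        rintro (hc | hc)
        exacts [hw hc, hwm hc]), if_neg hwm]

theorem pvDpl_congr (xs : List Int) (s t : List Int) (h : ∀ a : Int, a ∈ s ↔ a ∈ t) :
    pvDpl s xs = pvDpl t xs := by
  induction xs generalizing s t with
  | nil => rfl
  | cons x xs ih =>
      simp only [pvDpl]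
      by_cases hx : x ∈ s
      · rw [if_pos hx, if_pos ((h x).1 hx)]
      · rw [if_neg hx, if_neg (fun hc => hx ((h x).2 hc))]
        rw [ih (x :: s) (x :: t) (by intro a; simp [h a])]

theorem pvDpl_le_length (xs : List Int) (s : List Int) : pvDpl s xs ≤ xs.length := by
  induction xs generalizing s with
  | nil => simp [pvDpl]
  | cons x xs ih =>
      simp only [pvDpl]
      split
      · omega
      · have := ih (x :: s); simp; omega

theorem pvDpl_cons_min (xs : List Int) (v : Int) (s : List Int) :
    pvDpl (v :: s) xs = min (pvDpl s xs) (xs.findIdx (· == v)) := by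
  induction xs generalizing s with
  | nil => simp [pvDpl]
  | cons x xs ih =>
      by_cases hxv : x = v
      · subst hxv
        simp [pvDpl, List.findIdx_cons]
      · simp only [pvDpl, List.findIdx_cons, List.mem_cons]
        by_cases hxs : x ∈ s
        · simp [hxs, hxv]
        · have hne : ¬ (x = v ∨ x ∈ s) := by tauto
          rw [if_neg hne, if_neg hxs]
          have hcongr : pvDpl (v :: x :: s) xs = pvDpl (x :: v :: s) xs := by
            apply pvDpl_congr; intro a; constructor <;> (intro h; simp at h ⊢; tauto)
          have hbeq : (x == v) = false := by simp [hxv]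
          rw [hbeq]
          simp only [cond_false]
          rw [← hcongr, ih (x :: s)]
          omega

-- the prefix counted by pvDpl is duplicate-free and disjoint from 'seen'
theorem pvDpl_take_spec (xs : List Int) (s : List Int) :
    (xs.take (pvDpl s xs)).Nodup ∧ ∀ a ∈ xs.take (pvDpl s xs), a ∉ s := by
  induction xs generalizing s with
  | nil => simp
  | cons x xs ih =>
      simp only [pvDpl]
      by_cases hx : x ∈ s
      · simp [hx]
      · rw [if_neg hx]
        obtain ⟨h1, h2⟩ := ih (x :: s)
        refine ⟨?_, ?_⟩
        · simp only [List.take_succ_cons, List.nodup_cons]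
          exact ⟨fun hc => (h2 x hc) (by simp), h1⟩
        · intro a ha
          simp only [List.take_succ_cons, List.mem_cons] at ha
          rcases ha with rfl | ha
          · exact hx
          · exact fun hc => (h2 a ha) (by simp [hc])

theorem pvDpl_split (as bs s : List Int) (h1 : as.Nodup) (h2 : ∀ a ∈ as, a ∉ s) :
    pvDpl s (as ++ bs) = as.length + pvDpl (as ++ s) bs := by
  induction as generalizing s with
  | nil => simp
  | cons a as ih =>
      simp only [List.cons_append, pvDpl]
      rw [if_neg (h2 a (by simp))]
      simp only [List.nodup_cons] at h1
      rw [ih (a :: s) h1.2 (by intro x hx; simp; exact ⟨fun he => h1.1 (he ▸ hx), h2 x (by simp [hx])⟩)]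
      rw [pvDpl_congr bs (as ++ a :: s) (a :: as ++ s) (by intro x; simp; tauto)]
      simp [List.length_cons]; omega

theorem pvT_cast (m : Nat) :
    PySem.Int.floordiv ((m : Int) * ((m : Int) + 1)) 2 = ((pvT m : Nat) : Int) := by
  rw [PySem.Int.floordiv_eq_ediv_of_pos (by norm_num)]
  unfold pvT
  have : ((m : Int) * ((m : Int) + 1)) = ((m * (m + 1) : Nat) : Int) := by push_cast; ring
  rw [this]
  generalize m * (m + 1) = k
  omega

theorem pvGrowA_spec (arr : List Int) (nn : Nat) (h : nn ≤ arr.length) (s : List Int) (j : Nat)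
    (hj : j ≤ nn) :
    pvGrowA arr (nn : Int) s (j : Int) =
      (s ++ ((arr.take nn).drop j).take (pvDpl s ((arr.take nn).drop j)),
       ((j + pvDpl s ((arr.take nn).drop j) : Nat) : Int)) := by
  have key : ∀ (f : Nat) (s : List Int) (j : Nat), j ≤ nn → nn - j ≤ f →
      pvGrowA arr (nn : Int) s (j : Int) =
        (s ++ ((arr.take nn).drop j).take (pvDpl s ((arr.take nn).drop j)),
         ((j + pvDpl s ((arr.take nn).drop j) : Nat) : Int)) := by
    intro f
    induction f with
    | zero =>
        intro s j hj hf
        have hjn : j = nn := by omega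
        subst hjn
        rw [pvGrowA]
        rw [dif_neg (by omega)]
        rw [List.drop_eq_nil_of_le (by rw [List.length_take]; omega)]
        simp [pvDpl]
    | succ f ih =>
        intro s j hj hf
        by_cases hlt : j < nn
        · have hjl : j < arr.length := by omega
          have hx : (PySem.List.pyGet? arr (j : Int)).getD 0 = arr[j] := by
            simp [PySem.List.pyGet?_natCast, List.getElem?_eq_getElem hjl]
          have hdrop : (arr.take nn).drop j = arr[j] :: (arr.take nn).drop (j + 1) := by
            rw [List.drop_eq_getElem_cons (by rw [List.length_take]; omega)]
            congr 1
            exact List.getElem_take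
          by_cases hmem : arr[j] ∈ s
          · rw [pvGrowA, dif_neg (by rw [hx]; tauto)]
            rw [hdrop]
            simp [pvDpl, hmem]
          · rw [pvGrowA, dif_pos ⟨by omega, by rw [hx]; exact hmem⟩]
            rw [hx, show ((j : Int) + 1) = ((j + 1 : Nat) : Int) by push_cast; ring]
            rw [ih (s ++ [arr[j]]) (j + 1) (by omega) (by omega)]
            rw [hdrop]
            simp only [pvDpl, if_neg hmem]
            have hcg : pvDpl (s ++ [arr[j]]) ((arr.take nn).drop (j + 1)) =
                pvDpl (arr[j] :: s) ((arr.take nn).drop (j + 1)) := by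
              apply pvDpl_congr; intro a; simp; tauto
            rw [hcg]
            simp only [Prod.mk.injEq]
            refine ⟨by simp [List.take_succ_cons, List.append_assoc], by push_cast; ring⟩
        · have hjn : j = nn := by omega
          subst hjn
          rw [pvGrowA, dif_neg (by omega)]
          rw [List.drop_eq_nil_of_le (by rw [List.length_take]; omega)]
          simp [pvDpl]
  exact key (nn - j) s j hj le_rfl

theorem pvA_loop (arr : List Int) (nn : Nat) (h : nn ≤ arr.length) (i c : Nat)
    (hic : i + c ≤ nn) (hnd : (((arr.take nn).drop i).take c).Nodup) (ans : Int) :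
    ((PySem.List.pyRange (i : Int) (nn : Int) 1).foldl (fun (st : List Int × Int × Int) i =>
      let g := pvGrowA arr (nn : Int) st.1 st.2.1
      let ans := st.2.2 + PySem.Int.floordiv ((g.2 - i) * (g.2 - i + 1)) 2
      (((PySem.List.remove? g.1 ((PySem.List.pyGet? arr i).getD 0)).getD g.1), g.2, ans))
      (((arr.take nn).drop i).take c, ((i + c : Nat) : Int), ans)).2.2
      = ans + ((pvSpecSum ((arr.take nn).drop i) : Nat) : Int) := by
  have key : ∀ (f i c : Nat) (ans : Int), i + c ≤ nn →
      (((arr.take nn).drop i).take c).Nodup → nn - i ≤ f →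
      ((PySem.List.pyRange (i : Int) (nn : Int) 1).foldl (fun (st : List Int × Int × Int) i =>
        let g := pvGrowA arr (nn : Int) st.1 st.2.1
        let ans := st.2.2 + PySem.Int.floordiv ((g.2 - i) * (g.2 - i + 1)) 2
        (((PySem.List.remove? g.1 ((PySem.List.pyGet? arr i).getD 0)).getD g.1), g.2, ans))
        (((arr.take nn).drop i).take c, ((i + c : Nat) : Int), ans)).2.2
        = ans + ((pvSpecSum ((arr.take nn).drop i) : Nat) : Int) := by
    intro f
    induction f with
    | zero =>
        intro i c ans hic hnd hf
        have hi : i = nn := by omega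
        subst hi
        rw [PySem.List.pyRange_one_eq_nil le_rfl]
        rw [List.drop_eq_nil_of_le (by rw [List.length_take]; omega)]
        simp [pvSpecSum]
    | succ f ih =>
        intro i c ans hic hnd hf
        by_cases hlt : i < nn
        · have hlen : ((arr.take nn).drop i).length = nn - i := by
            rw [List.length_drop, List.length_take]; omega
          have hgrow := pvGrowA_spec arr nn h (((arr.take nn).drop i).take c) (i + c) hic
          set l := arr.take nn with hl
          set d := pvDpl ((l.drop i).take c) (l.drop (i + c)) with hd
          have hdd : (l.drop i).drop c = l.drop (i + c) := by rw [List.drop_drop]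
          have hsplit : pvDpl [] (l.drop i) = c + d := by
            have := pvDpl_split ((l.drop i).take c) ((l.drop i).drop c) [] hnd
              (by intro a _; simp)
            rw [List.take_append_drop] at this
            rw [this, List.append_nil, List.length_take, hlen, hdd]
            omega
          have hdle : pvDpl [] (l.drop i) ≤ nn - i := by
            have := pvDpl_le_length (l.drop i) []
            omega
          have hil : i < arr.length := by omega
          have hgetl : l[i]'(by rw [hl, List.length_take]; omega) = arr[i] := List.getElem_take
          have hpos : l.drop i = l[i]'(by rw [hl, List.length_take]; omega) :: l.drop (i + 1) := by
            exact List.drop_eq_getElem_cons (by rw [hl, List.length_take]; omega)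
          have hone : 1 ≤ pvDpl [] (l.drop i) := by
            rw [hpos]; simp [pvDpl]
          have hg1 : ((l.drop i).take c) ++ (l.drop (i + c)).take d = (l.drop i).take (c + d) := by
            rw [List.take_add, hdd]
          obtain ⟨e, he⟩ : ∃ e, c + d = e + 1 := ⟨c + d - 1, by omega⟩
          have htake : (l.drop i).take (c + d) =
              l[i]'(by rw [hl, List.length_take]; omega) :: (l.drop (i + 1)).take (c + d - 1) := by
            rw [hpos, he, List.take_succ_cons, show e + 1 - 1 = e by omega]
          have hx : (PySem.List.pyGet? arr (i : Int)).getD 0 = arr[i] := by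
            simp [PySem.List.pyGet?_natCast, List.getElem?_eq_getElem hil]
          rw [PySem.List.pyRange_one_cons (by omega)]
          simp only [List.foldl_cons, hgrow, hg1]
          rw [htake, hx, ← hgetl]
          rw [PySem.List.remove?_cons_self]
          simp only [Option.getD_some]
          have hnext : ((l.drop (i + 1)).take (c + d - 1)).Nodup := by
            have h1 := (pvDpl_take_spec (l.drop i) []).1
            rw [hsplit, htake] at h1
            exact (List.nodup_cons.1 h1).2
          have hrec := ih (i + 1) (c + d - 1) (ans + PySem.Int.floordiv
              ((((i + c + d : Nat) : Int) - (i : Int)) * (((i + c + d : Nat) : Int) - (i : Int) + 1)) 2)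
            (by omega) hnext (by omega)
          have hTi : PySem.Int.floordiv ((((i + c + d : Nat) : Int) - (i : Int)) *
              (((i + c + d : Nat) : Int) - (i : Int) + 1)) 2 = ((pvT (c + d) : Nat) : Int) := by
            rw [show (((i + c + d : Nat) : Int) - (i : Int)) = ((c + d : Nat) : Int) by push_cast; ring]
            exact pvT_cast (c + d)
          have hspec : pvSpecSum (l.drop i) = pvT (pvDpl [] (l.drop i)) + pvSpecSum (l.drop (i + 1)) := by
            conv_lhs => rw [hpos]
            rw [pvSpecSum, ← hpos]
          have hfinal : ans + PySem.Int.floordiv ((((i + c + d : Nat) : Int) - (i : Int)) *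
              (((i + c + d : Nat) : Int) - (i : Int) + 1)) 2
              + ((pvSpecSum (l.drop (i + 1)) : Nat) : Int)
              = ans + ((pvSpecSum (l.drop i) : Nat) : Int) := by
            rw [hTi, hspec, hsplit]
            push_cast
            ring
          rw [show ((i + 1 + (c + d - 1) : Nat) : Int) = ((i + c + d : Nat) : Int) by
              push_cast; omega] at hrec
          rw [show ((i + 1 : Nat) : Int) = ((i : Int) + 1) by push_cast; ring] at hrec
          exact hrec.trans hfinal
        · have hi : i = nn := by omega
          subst hi
          rw [PySem.List.pyRange_one_eq_nil le_rfl]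
          rw [List.drop_eq_nil_of_le (by rw [List.length_take]; omega)]
          simp [pvSpecSum]
  exact key (nn - i) i c ans hic hnd le_rfl

theorem pvB_loop (arr : List Int) (nn : Nat) (h : nn ≤ arr.length) (i : Nat) (hi : i ≤ nn) :
    ∃ D : PySem.Dict Int Int,
      ((PySem.List.pyRange ((nn : Int) - 1) ((i : Int) - 1) (-1)).foldl
        (fun (st : PySem.Dict Int Int × Int × Int) k =>
          let v := (PySem.List.pyGet? arr k).getD 0
          let bound := match st.1.get? v with
            | some x => if x < st.2.1 then x else st.2.1
            | none => st.2.1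
          (st.1.insert v k, bound,
            st.2.2 + PySem.Int.floordiv ((bound - k) * (bound - k + 1)) 2))
        (PySem.Dict.empty, (nn : Int), 0))
      = (D, ((i + pvDpl [] ((arr.take nn).drop i) : Nat) : Int),
          ((pvSpecSum ((arr.take nn).drop i) : Nat) : Int))
      ∧ ∀ v : Int, D.get? v = pvNxt (arr.take nn) i v := by
  have snoc : ∀ (a c : Int), c ≤ a →
      PySem.List.pyRange a (c - 1) (-1) = PySem.List.pyRange a c (-1) ++ [c] := by
    intro a c hca
    rw [PySem.List.pyRange_neg_one_eq_reverse, PySem.List.pyRange_neg_one_eq_reverse,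
      show c - 1 + 1 = c by ring, PySem.List.pyRange_one_cons (by omega)]
    simp
  have key : ∀ (f i : Nat), i ≤ nn → nn - i ≤ f →
      ∃ D : PySem.Dict Int Int,
      ((PySem.List.pyRange ((nn : Int) - 1) ((i : Int) - 1) (-1)).foldl
        (fun (st : PySem.Dict Int Int × Int × Int) i =>
          let v := (PySem.List.pyGet? arr i).getD 0
          let bound := match st.1.get? v with
            | some k => if k < st.2.1 then k else st.2.1
            | none => st.2.1
          (st.1.insert v i, bound,
            st.2.2 + PySem.Int.floordiv ((bound - i) * (bound - i + 1)) 2))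
        (PySem.Dict.empty, (nn : Int), 0))
      = (D, ((i + pvDpl [] ((arr.take nn).drop i) : Nat) : Int),
          ((pvSpecSum ((arr.take nn).drop i) : Nat) : Int))
      ∧ ∀ v : Int, D.get? v = pvNxt (arr.take nn) i v := by
    intro f
    induction f with
    | zero =>
        intro i hi hf
        have hin : i = nn := by omega
        subst hin
        refine ⟨PySem.Dict.empty, ?_, ?_⟩
        · rw [PySem.List.pyRange_neg_one_eq_nil le_rfl]
          rw [List.drop_eq_nil_of_le (by rw [List.length_take]; omega)]
          simp [pvDpl, pvSpecSum]
        · intro v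
          simp only [pvNxt]
          rw [List.drop_eq_nil_of_le (by rw [List.length_take]; omega)]
          simp
    | succ f ih =>
        intro i hi hf
        by_cases hlt : i < nn
        · obtain ⟨D', hfold, hdict⟩ := ih (i + 1) (by omega) (by omega)
          set l := arr.take nn with hl
          have hil : i < arr.length := by omega
          have hll : i < l.length := by rw [hl, List.length_take]; omega
          have hgetl : l[i]'hll = arr[i] := List.getElem_take
          have hpos : l.drop i = l[i]'hll :: l.drop (i + 1) := List.drop_eq_getElem_cons hll
          have hx : (PySem.List.pyGet? arr (i : Int)).getD 0 = arr[i] := by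
            simp [PySem.List.pyGet?_natCast, List.getElem?_eq_getElem hil]
          set d1 := pvDpl [] (l.drop (i + 1)) with hd1
          set fidx := (l.drop (i + 1)).findIdx (· == l[i]'hll) with hfidx
          have hcons : pvDpl [] (l[i]'hll :: l.drop (i + 1)) =
              pvDpl [l[i]'hll] (l.drop (i + 1)) + 1 := by simp [pvDpl]
          have hKey : pvDpl [] (l.drop i) = min d1 fidx + 1 := by
            rw [hpos, hcons, pvDpl_cons_min]
          rw [snoc ((nn : Int) - 1) (i : Int) (by omega)]
          rw [List.foldl_append]
          rw [show (((i + 1 : Nat) : Int) - 1) = ((i : Int)) by push_cast; ring] at hfold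
          rw [hfold]
          simp only [List.foldl_cons, List.foldl_nil]
          rw [hx, hdict (arr[i])]
          refine ⟨D'.insert (arr[i]) (i : Int), ?_, ?_⟩
          · have hspec : pvSpecSum (l.drop i) = pvT (pvDpl [] (l.drop i)) + pvSpecSum (l.drop (i + 1)) := by
              conv_lhs => rw [hpos]
              rw [pvSpecSum, ← hpos]
            by_cases hm : arr[i] ∈ l.drop (i + 1)
            · have hnx : pvNxt l (i + 1) (arr[i]) =
                  some (((i + 1) + fidx : Nat) : Int) := by
                rw [pvNxt, if_pos hm, hfidx, hgetl]
              rw [hnx]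
              simp only []
              have hbound : (if (((i + 1) + fidx : Nat) : Int) < ((i + 1 + d1 : Nat) : Int)
                  then (((i + 1) + fidx : Nat) : Int) else ((i + 1 + d1 : Nat) : Int))
                  = ((i + pvDpl [] (l.drop i) : Nat) : Int) := by
                rw [hKey]
                split_ifs <;> (push_cast at *; omega)
              rw [hbound]
              have hT : PySem.Int.floordiv ((((i + pvDpl [] (l.drop i) : Nat) : Int) - (i : Int)) *
                  (((i + pvDpl [] (l.drop i) : Nat) : Int) - (i : Int) + 1)) 2
                  = ((pvT (pvDpl [] (l.drop i)) : Nat) : Int) := by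
                rw [show (((i + pvDpl [] (l.drop i) : Nat) : Int) - (i : Int))
                    = ((pvDpl [] (l.drop i) : Nat) : Int) by push_cast; ring]
                exact pvT_cast _
              rw [hT, hspec]
              simp only [Prod.mk.injEq]
              refine ⟨by trivial, by trivial, by push_cast; ring⟩
            · have hnx : pvNxt l (i + 1) (arr[i]) = none := by
                rw [pvNxt, if_neg hm]
              rw [hnx]
              have hEq : pvDpl [] (l.drop i) = d1 + 1 := by
                have hfl : fidx = (l.drop (i + 1)).length := by
                  rw [hfidx]
                  exact List.findIdx_eq_length.2 (by
                    intro x hxm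
                    rw [beq_eq_false_iff_ne]
                    intro he
                    exact hm (hgetl ▸ he ▸ hxm))
                have hdl : d1 ≤ (l.drop (i + 1)).length := pvDpl_le_length _ _
                omega
              have hT : PySem.Int.floordiv ((((i + 1 + d1 : Nat) : Int) - (i : Int)) *
                  (((i + 1 + d1 : Nat) : Int) - (i : Int) + 1)) 2
                  = ((pvT (pvDpl [] (l.drop i)) : Nat) : Int) := by
                rw [show (((i + 1 + d1 : Nat) : Int) - (i : Int))
                    = ((pvDpl [] (l.drop i) : Nat) : Int) by rw [hEq]; push_cast; ring]
                exact pvT_cast _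
              rw [hT, hspec]
              simp only [Prod.mk.injEq]
              refine ⟨by trivial, by rw [hEq]; push_cast; ring, by push_cast; ring⟩
          · intro w
            rw [PySem.Dict.get?_insert D' (arr[i]) w (i : Int)]
            rw [hdict w, pvNxt_step l i hll w, hgetl]
        · have hin : i = nn := by omega
          subst hin
          refine ⟨PySem.Dict.empty, ?_, ?_⟩
          · rw [PySem.List.pyRange_neg_one_eq_nil le_rfl]
            rw [List.drop_eq_nil_of_le (by rw [List.length_take]; omega)]
            simp [pvDpl, pvSpecSum]
          · intro v
            simp only [pvNxt]
            rw [List.drop_eq_nil_of_le (by rw [List.length_take]; omega)]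
            simp
  exact key (nn - i) i hi le_rfl

-- ===== VERDICT (by name: the statement is the Claim_ definition above) =====
theorem sumofLength_spec : Claim_equal_sumofLength := by
  intro arr n _ hpre
  unfold Spec_sumofLength sumofLength sumofLength_alt
  by_cases hn : n ≤ 0
  · rw [PySem.List.pyRange_one_eq_nil hn, PySem.List.pyRange_neg_one_eq_nil (by omega)]
    rfl
  · have h : n.toNat ≤ arr.length := by unfold Pre_sumofLength at hpre; omega
    have hcast : n = ((n.toNat : Nat) : Int) := by omega
    rw [hcast]
    obtain ⟨D, hfold, -⟩ := pvB_loop arr n.toNat h 0 (by omega)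
    have hA := pvA_loop arr n.toNat h 0 0 (by omega) (by simp) 0
    have hB := congrArg (fun p : PySem.Dict Int Int × Int × Int => p.2.2) hfold
    simp only [List.drop_zero] at hA hB
    exact hA.trans (by rw [zero_add]; exact hB.symm)
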